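-- pv_equiv track=rewrite | github.com/Shiido123/epreuves_pratiques_NSI2024 | sujet 35/exo1.py | annee_temperature_minimale
-- ===== SOURCE A (Python) =====
-- def annee_temperature_minimale(temperature_moyenne, annees):
--     min = temperature_moyenne[0]
--     min_indice = 0
--     for indice, valeur in enumerate(temperature_moyenne):
--         if valeur < min:
--             min = valeur
--             min_indice = indice
--     return (min, annees[min_indice])
-- ===== SOURCE B (Python) =====
-- def annee_temperature_minimale(temperature_moyenne, annees):
--     m = min(temperature_moyenne)
--     return (m, annees[temperature_moyenne.index(m)])
-- ===== Notes on version B (the rewrite author's own statement) =====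
-- stated objective: simpler
-- what changed: Replaces the hand-written enumerate loop tracking a running minimum and its index by two builtin passes: min() for the value, list.index() for its first position.
import Mathlib
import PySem

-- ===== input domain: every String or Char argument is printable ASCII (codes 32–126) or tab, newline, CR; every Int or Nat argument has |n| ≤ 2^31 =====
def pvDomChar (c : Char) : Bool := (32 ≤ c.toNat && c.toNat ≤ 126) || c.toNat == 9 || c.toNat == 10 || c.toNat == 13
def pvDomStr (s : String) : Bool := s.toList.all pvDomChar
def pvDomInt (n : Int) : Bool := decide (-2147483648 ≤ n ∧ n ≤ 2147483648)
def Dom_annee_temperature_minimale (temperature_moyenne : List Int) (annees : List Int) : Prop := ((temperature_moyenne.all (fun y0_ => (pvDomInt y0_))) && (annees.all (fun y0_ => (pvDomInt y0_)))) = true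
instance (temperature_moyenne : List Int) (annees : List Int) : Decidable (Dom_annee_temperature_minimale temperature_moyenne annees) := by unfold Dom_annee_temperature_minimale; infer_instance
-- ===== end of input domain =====

-- B replaces A's single enumerate loop tracking (running min, its index) by two passes — min() then list.index() — a simpler decomposition.


-- ===== PORT A =====
-- loop body of A: keep (min, min_indice), update when valeur < min
def pvStepA (s : Int × Int) (p : Int × Int) : Int × Int :=
  if p.2 < s.1 then (p.2, p.1) else s

def annee_temperature_minimale (temperature_moyenne : List Int) (annees : List Int) : Int × Int :=
  let min0 := (PySem.List.pyGet? temperature_moyenne 0).getD 0   -- temperature_moyenne[0]; none (IndexError) excluded by Pre_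
  let st := (PySem.List.enumerate temperature_moyenne).foldl pvStepA (min0, 0)
  (st.1, (PySem.List.pyGet? annees st.2).getD 0)                 -- annees[min_indice]; none excluded by Pre_

-- ===== PORT B =====
def annee_temperature_minimale_alt (temperature_moyenne : List Int) (annees : List Int) : Int × Int :=
  let m := (PySem.List.min? temperature_moyenne (fun y => y)).getD 0            -- min(temperature_moyenne)
  let i := ((PySem.List.index? temperature_moyenne m).getD 0 : Nat)             -- temperature_moyenne.index(m)
  (m, (PySem.List.pyGet? annees (i : Int)).getD 0)                              -- annees[i]

-- ===== PRECONDITION & SPEC =====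
-- Pre_ excludes exactly the inputs where A raises IndexError: an empty temperature list, or
-- annees shorter than (first index of the minimal temperature) + 1.
def Pre_annee_temperature_minimale (temperature_moyenne : List Int) (annees : List Int) : Prop :=
  temperature_moyenne ≠ [] ∧
  ∀ m ∈ temperature_moyenne, (∀ y ∈ temperature_moyenne, m ≤ y) →
    temperature_moyenne.idxOf m < annees.length
instance (temperature_moyenne : List Int) (annees : List Int) : Decidable (Pre_annee_temperature_minimale temperature_moyenne annees) := by unfold Pre_annee_temperature_minimale; infer_instance

def pvWitness_annee_temperature_minimale : List Int × List Int := ([3, 1, 2], [2000, 2001, 2002])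

def Spec_annee_temperature_minimale (temperature_moyenne : List Int) (annees : List Int) (out : Int × Int) : Prop := out = annee_temperature_minimale_alt temperature_moyenne annees
instance (temperature_moyenne : List Int) (annees : List Int) (out : Int × Int) : Decidable (Spec_annee_temperature_minimale temperature_moyenne annees out) := by unfold Spec_annee_temperature_minimale; infer_instance

-- ===== CLAIM (what is proved, stated in full; the proofs are below) =====
def Claim_equal_annee_temperature_minimale : Prop := ∀ (temperature_moyenne : List Int) (annees : List Int), Dom_annee_temperature_minimale temperature_moyenne annees → Pre_annee_temperature_minimale temperature_moyenne annees → Spec_annee_temperature_minimale temperature_moyenne annees (annee_temperature_minimale temperature_moyenne annees)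

-- ===== LEMMAS AND PROOFS =====

theorem pv_foldl_min_le (t : List Int) (a : Int) : t.foldl min a ≤ a := by
  induction t generalizing a with
  | nil => simp
  | cons y ys ih => simpa using le_trans (ih (min a y)) (min_le_left a y)

-- Invariant of A's loop: from state (cur, ci) over 'enumerate xs k', the result is
-- (the overall min, k + first index of that min in xs) when xs improves on cur, else (cur, ci).
theorem pv_loop_spec (xs : List Int) (cur ci : Int) (k : Int) :
    (PySem.List.enumerate xs k).foldl pvStepA (cur, ci) =
      if xs.foldl min cur < cur
      then (xs.foldl min cur, k + (xs.idxOf (xs.foldl min cur) : Int))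
      else (cur, ci) := by
  induction xs generalizing cur ci k with
  | nil => simp
  | cons y ys ih =>
    rw [PySem.List.enumerate_cons, List.foldl_cons]
    by_cases hy : y < cur
    · have hstep : pvStepA (cur, ci) (k, y) = (y, k) := by simp [pvStepA, hy]
      rw [hstep, ih]
      have hmin : min cur y = y := min_eq_right hy.le
      have hle : ys.foldl min y ≤ y := pv_foldl_min_le ys y
      by_cases hM : ys.foldl min y < y
      · have hne : y ≠ ys.foldl min y := (ne_of_gt hM)
        simp only [List.foldl_cons, hmin, if_pos hM, if_pos (lt_trans hM hy),
          List.idxOf_cons_ne ys hne]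
        rw [Prod.mk.injEq]
        exact ⟨rfl, by push_cast; ring⟩
      · have heq : ys.foldl min y = y := le_antisymm hle (not_lt.mp hM)
        simp only [List.foldl_cons, hmin, heq, if_pos hy, List.idxOf_cons_self]
        simp
    · have hstep : pvStepA (cur, ci) (k, y) = (cur, ci) := by simp [pvStepA, hy]
      rw [hstep, ih]
      have hmin : min cur y = cur := min_eq_left (not_lt.mp hy)
      by_cases hM : ys.foldl min cur < cur
      · have hne : y ≠ ys.foldl min cur := ne_of_gt (lt_of_lt_of_le hM (not_lt.mp hy))
        simp only [List.foldl_cons, hmin, if_pos hM, List.idxOf_cons_ne ys hne]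
        rw [Prod.mk.injEq]
        exact ⟨rfl, by push_cast; ring⟩
      · simp only [List.foldl_cons, hmin, if_neg hM]

theorem pv_index_getD_of_mem (xs : List Int) (v : Int) (h : v ∈ xs) :
    ((PySem.List.index? xs v).getD 0 : Nat) = xs.idxOf v := by
  induction xs with
  | nil => cases h
  | cons x t ih =>
    by_cases hx : x = v
    · subst hx
      rw [PySem.List.index?_cons_self, List.idxOf_cons_self]
      rfl
    · have hv : v ∈ t := by
        cases List.mem_cons.mp h with
        | inl h' => exact absurd h'.symm hx
        | inr h' => exact h'
      rw [PySem.List.index?_cons_of_ne (h := hx)]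
      obtain ⟨j, hj⟩ := Option.isSome_iff_exists.mp ((PySem.List.index?_isSome_iff t v).mpr hv)
      have hih := ih hv
      rw [hj] at hih ⊢
      simp only [Option.getD_some] at hih
      simp only [Option.map_some, Option.getD_some, List.idxOf_cons_ne t hx, hih]

theorem pv_foldl_min_mem_of_lt (xs : List Int) (a : Int) (h : xs.foldl min a < a) :
    xs.foldl min a ∈ xs := by
  rcases PySem.List.foldl_min_mem xs a with h1 | h1
  · exact absurd h1 (by intro he; rw [he] at h; exact lt_irrefl a h)
  · exact h1

-- ===== VERDICT (by name: the statement is the Claim_ definition above) =====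
theorem annee_temperature_minimale_spec : Claim_equal_annee_temperature_minimale := by
  unfold Claim_equal_annee_temperature_minimale
  intro t a _ hpre
  obtain ⟨hne, -⟩ := hpre
  obtain ⟨x, xs, rfl⟩ := List.exists_cons_of_ne_nil hne
  unfold Spec_annee_temperature_minimale
  unfold annee_temperature_minimale annee_temperature_minimale_alt
  dsimp only
  rw [PySem.List.min?_id_cons]
  rw [PySem.List.enumerate_cons, List.foldl_cons]
  have hstep : pvStepA (((PySem.List.pyGet? (x :: xs) 0).getD 0), 0) (0, x) = (x, 0) := by
    simp [pvStepA, PySem.List.pyGet?, PySem.List.pyIdx?]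
  rw [hstep, pv_loop_spec]
  by_cases hM : xs.foldl min x < x
  · have hmem : xs.foldl min x ∈ xs := pv_foldl_min_mem_of_lt xs x hM
    have hne2 : x ≠ xs.foldl min x := ne_of_gt hM
    have hidx := pv_index_getD_of_mem (x :: xs) (xs.foldl min x) (List.mem_cons_of_mem x hmem)
    simp only [if_pos hM, Option.getD_some, hidx, List.idxOf_cons_ne xs hne2]
    rw [Prod.mk.injEq]
    exact ⟨rfl, by push_cast; ring_nf⟩
  · have heq : xs.foldl min x = x := le_antisymm (pv_foldl_min_le xs x) (not_lt.mp hM)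
    have hidx := pv_index_getD_of_mem (x :: xs) x (List.mem_cons_self)
    rw [if_neg hM]
    simp only [Option.getD_some, heq, hidx, List.idxOf_cons_self]
    rfl
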